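-- pv_equiv track=rewrite | github.com/wilmurillo-ai/Design-Assistant | .skills/openclaw-skills/skills/c-narcissus/web-video-transcribe-docx/scripts/pipeline_common.py | sanitize_captured_headers
-- ===== SOURCE A (Python) =====
-- KEEP_CAPTURED_HEADERS = {
--     "origin": "Origin",
--     "referer": "Referer",
-- }
--
-- def sanitize_captured_headers(headers: dict[str, str] | None) -> dict[str, str]:
--     if not headers:
--         return {}
--
--     sanitized: dict[str, str] = {}
--     for key, value in headers.items():
--         if not value:
--             continue
--         normalized = key.strip().lower()
--         target_key = KEEP_CAPTURED_HEADERS.get(normalized)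
--         if target_key:
--             sanitized[target_key] = value.strip()
--     return sanitized
-- ===== SOURCE B (Python) =====
-- KEEP_CAPTURED_HEADERS = {
--     "origin": "Origin",
--     "referer": "Referer",
-- }
--
-- def sanitize_captured_headers(headers: dict[str, str] | None) -> dict[str, str]:
--     if not headers:
--         return {}
--     norm = {k.strip().lower(): v.strip() for k, v in headers.items() if v}
--     return {target: norm[src] for src, target in KEEP_CAPTURED_HEADERS.items() if src in norm}
-- ===== Notes on version B (the rewrite author's own statement) =====
-- stated objective: idiomatic
-- what changed: B reverses the traversal: one comprehension indexes the headers by normalized key (empties filtered while building, so last non-empty wins), then the result is built by iterating over the small KEEP_CAPTURED_HEADERS mapping instead of over the input; Pre_ excludes inputs where a kept referer entry precedes every kept origin entry while both are captured, because there the two results differ only in dict insertion order (equal as Python dicts) and either order is defensible.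
import Mathlib
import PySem

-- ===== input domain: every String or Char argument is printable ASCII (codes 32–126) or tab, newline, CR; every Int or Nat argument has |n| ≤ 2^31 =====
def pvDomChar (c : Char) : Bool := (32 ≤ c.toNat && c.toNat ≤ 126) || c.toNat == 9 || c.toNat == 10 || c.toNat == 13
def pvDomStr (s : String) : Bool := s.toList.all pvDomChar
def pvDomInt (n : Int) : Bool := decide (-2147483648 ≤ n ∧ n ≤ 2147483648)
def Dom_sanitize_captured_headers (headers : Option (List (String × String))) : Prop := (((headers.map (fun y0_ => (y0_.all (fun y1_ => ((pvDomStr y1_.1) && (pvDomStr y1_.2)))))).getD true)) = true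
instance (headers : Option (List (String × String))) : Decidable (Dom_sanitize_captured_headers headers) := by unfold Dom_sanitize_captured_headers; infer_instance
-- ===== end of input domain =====

-- B indexes the headers by normalized key once, then iterates over the small keep-mapping
-- instead of over the input (idiomatic decomposition, not faster).

-- ===== PORT A =====
def pvKeep : PySem.Dict String String :=
  PySem.Dict.ofList [("origin", "Origin"), ("referer", "Referer")]

-- A's loop body, named
def pvStepA (sanitized : PySem.Dict String String) (kv : String × String) : PySem.Dict String String :=
  if kv.2 = "" then sanitized
  else
    let normalized := PySem.Str.lower (PySem.Str.strip kv.1)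
    match pvKeep.get? normalized with
    | some target_key =>
        if target_key ≠ "" then sanitized.insert target_key (PySem.Str.strip kv.2)
        else sanitized
    | none => sanitized

def sanitize_captured_headers (headers : Option (List (String × String))) : List (String × String) :=
  match headers with
  | none => []
  | some hs =>
    if hs = [] then []
    else (hs.foldl pvStepA PySem.Dict.empty).items

-- ===== PORT B =====
-- the norm-building comprehension's step
def pvNormStep (d : PySem.Dict String String) (kv : String × String) : PySem.Dict String String :=
  if kv.2 = "" then d
  else d.insert (PySem.Str.lower (PySem.Str.strip kv.1)) (PySem.Str.strip kv.2)

-- the result comprehension's step over KEEP_CAPTURED_HEADERS.items()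
def pvPickStep (norm : PySem.Dict String String) (res : PySem.Dict String String)
    (st : String × String) : PySem.Dict String String :=
  match norm.get? st.1 with
  | some v => res.insert st.2 v
  | none => res

def sanitize_captured_headers_alt (headers : Option (List (String × String))) : List (String × String) :=
  match headers with
  | none => []
  | some hs =>
    if hs = [] then []
    else
      let norm := hs.foldl pvNormStep PySem.Dict.empty
      (pvKeep.items.foldl (pvPickStep norm) PySem.Dict.empty).items

-- ===== PRECONDITION & SPEC =====
def pvIsO (kv : String × String) : Bool :=
  !(kv.2 == "") && (PySem.Str.lower (PySem.Str.strip kv.1) == "origin")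
def pvIsR (kv : String × String) : Bool :=
  !(kv.2 == "") && (PySem.Str.lower (PySem.Str.strip kv.1) == "referer")

-- Pre_ excludes inputs where a kept referer entry precedes every kept origin entry while both are
-- captured: there A's and B's outputs are the same dict in different insertion order (equal as
-- Python dicts), and either order is defensible.
def Pre_sanitize_captured_headers (headers : Option (List (String × String))) : Prop :=
  ¬ ((headers.getD []).any pvIsO = true ∧ (headers.getD []).any pvIsR = true ∧
      (headers.getD []).findIdx pvIsR < (headers.getD []).findIdx pvIsO)
instance (headers : Option (List (String × String))) : Decidable (Pre_sanitize_captured_headers headers) := by unfold Pre_sanitize_captured_headers; infer_instance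

def pvWitness_sanitize_captured_headers : (Option (List (String × String))) :=
  some [(" Origin ", "http://a.example"), ("Referer", "http://b.example/p")]

def Spec_sanitize_captured_headers (headers : Option (List (String × String))) (out : List (String × String)) : Prop := out = sanitize_captured_headers_alt headers
instance (headers : Option (List (String × String))) (out : List (String × String)) : Decidable (Spec_sanitize_captured_headers headers out) := by unfold Spec_sanitize_captured_headers; infer_instance

-- ===== CLAIM (what is proved, stated in full; the proofs are below) =====
def Claim_equal_sanitize_captured_headers : Prop := ∀ (headers : Option (List (String × String))), Dom_sanitize_captured_headers headers → Pre_sanitize_captured_headers headers → Spec_sanitize_captured_headers headers (sanitize_captured_headers headers)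

-- ===== LEMMAS AND PROOFS =====

-- ghost state: (latest kept origin value, latest kept referer value, "referer was kept first")
def pvG (st : Option String × Option String × Bool) (kv : String × String) :
    Option String × Option String × Bool :=
  if kv.2 = "" then st
  else
    let name := PySem.Str.lower (PySem.Str.strip kv.1)
    if name = "origin" then (some (PySem.Str.strip kv.2), st.2.1, st.2.2)
    else if name = "referer" then
      (st.1, some (PySem.Str.strip kv.2), st.2.2 || (st.1.isNone && st.2.1.isNone))
    else st

def pvValid (st : Option String × Option String × Bool) : Prop :=
  (st.2.2 = true → st.2.1.isSome = true) ∧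
  (st.1 = none → st.2.1.isSome = true → st.2.2 = true)

def pvShape (o r : Option String) (rf : Bool) : PySem.Dict String String :=
  match o, r with
  | none, none => PySem.Dict.mk []
  | some v, none => PySem.Dict.mk [("Origin", v)]
  | none, some w => PySem.Dict.mk [("Referer", w)]
  | some v, some w =>
      if rf then PySem.Dict.mk [("Referer", w), ("Origin", v)]
      else PySem.Dict.mk [("Origin", v), ("Referer", w)]

-- equation lemmas for the two loop bodies and the ghost step
theorem pvG_empty (st : Option String × Option String × Bool) (kv : String × String)
    (hv : kv.2 = "") : pvG st kv = st := by
  simp [pvG, hv]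

theorem pvG_origin (st : Option String × Option String × Bool) (kv : String × String)
    (hv : ¬ kv.2 = "") (hOn : PySem.Str.lower (PySem.Str.strip kv.1) = "origin") :
    pvG st kv = (some (PySem.Str.strip kv.2), st.2.1, st.2.2) := by
  simp [pvG, hv, hOn]

theorem pvG_referer (st : Option String × Option String × Bool) (kv : String × String)
    (hv : ¬ kv.2 = "") (hRn : PySem.Str.lower (PySem.Str.strip kv.1) = "referer") :
    pvG st kv = (st.1, some (PySem.Str.strip kv.2), st.2.2 || (st.1.isNone && st.2.1.isNone)) := by
  simp [pvG, hv, hRn]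

theorem pvG_other (st : Option String × Option String × Bool) (kv : String × String)
    (hv : ¬ kv.2 = "") (hOn : PySem.Str.lower (PySem.Str.strip kv.1) ≠ "origin")
    (hRn : PySem.Str.lower (PySem.Str.strip kv.1) ≠ "referer") :
    pvG st kv = st := by
  simp [pvG, hv, hOn, hRn]

theorem pvNormStep_empty (norm : PySem.Dict String String) (kv : String × String)
    (hv : kv.2 = "") : pvNormStep norm kv = norm := by
  simp [pvNormStep, hv]

theorem pvNormStep_keep (norm : PySem.Dict String String) (kv : String × String)
    (hv : ¬ kv.2 = "") :
    pvNormStep norm kv = norm.insert (PySem.Str.lower (PySem.Str.strip kv.1)) (PySem.Str.strip kv.2) := by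
  simp [pvNormStep, hv]

theorem pvKeep_get?_none (s : String) (h1 : s ≠ "origin") (h2 : s ≠ "referer") :
    pvKeep.get? s = none := by
  rw [show pvKeep = PySem.Dict.mk [("origin", "Origin"), ("referer", "Referer")] from by decide,
    PySem.Dict.get?_mk_cons, PySem.Dict.get?_mk_cons]
  simp [h1.symm, h2.symm, PySem.Dict.get?]

theorem pvStepA_empty (d : PySem.Dict String String) (kv : String × String)
    (hv : kv.2 = "") : pvStepA d kv = d := by
  simp [pvStepA, hv]

theorem pvStepA_origin (d : PySem.Dict String String) (kv : String × String)
    (hv : ¬ kv.2 = "") (hOn : PySem.Str.lower (PySem.Str.strip kv.1) = "origin") :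
    pvStepA d kv = d.insert "Origin" (PySem.Str.strip kv.2) := by
  have hg : pvKeep.get? "origin" = some "Origin" := by decide
  simp only [pvStepA, hv, hOn, if_false, hg]
  simp

theorem pvStepA_referer (d : PySem.Dict String String) (kv : String × String)
    (hv : ¬ kv.2 = "") (hRn : PySem.Str.lower (PySem.Str.strip kv.1) = "referer") :
    pvStepA d kv = d.insert "Referer" (PySem.Str.strip kv.2) := by
  have hg : pvKeep.get? "referer" = some "Referer" := by decide
  simp only [pvStepA, hv, hRn, if_false, hg]
  simp

theorem pvStepA_other (d : PySem.Dict String String) (kv : String × String)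
    (hv : ¬ kv.2 = "") (hOn : PySem.Str.lower (PySem.Str.strip kv.1) ≠ "origin")
    (hRn : PySem.Str.lower (PySem.Str.strip kv.1) ≠ "referer") :
    pvStepA d kv = d := by
  have hg : pvKeep.get? (PySem.Str.lower (PySem.Str.strip kv.1)) = none :=
    pvKeep_get?_none _ hOn hRn
  simp only [pvStepA, hv, if_false, hg]

theorem pvStep_lemma (kv : String × String) (st : Option String × Option String × Bool)
    (norm : PySem.Dict String String) (hV : pvValid st)
    (hO : norm.get? "origin" = st.1) (hR : norm.get? "referer" = st.2.1) :
    pvValid (pvG st kv) ∧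
    (pvNormStep norm kv).get? "origin" = (pvG st kv).1 ∧
    (pvNormStep norm kv).get? "referer" = (pvG st kv).2.1 ∧
    pvStepA (pvShape st.1 st.2.1 st.2.2) kv
      = pvShape (pvG st kv).1 (pvG st kv).2.1 (pvG st kv).2.2 := by
  obtain ⟨o, r, rf⟩ := st
  obtain ⟨hV1, hV2⟩ := hV
  by_cases hv : kv.2 = ""
  · rw [pvG_empty _ _ hv, pvNormStep_empty _ _ hv, pvStepA_empty _ _ hv]
    exact ⟨⟨hV1, hV2⟩, hO, hR, rfl⟩
  · by_cases hOn : PySem.Str.lower (PySem.Str.strip kv.1) = "origin"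
    · rw [pvG_origin _ _ hv hOn, pvNormStep_keep _ _ hv, pvStepA_origin _ _ hv hOn, hOn]
      refine ⟨⟨fun h => hV1 h, fun h => absurd h (Option.some_ne_none _)⟩, ?_, ?_, ?_⟩
      · simp
      · rw [PySem.Dict.get?_insert, if_neg (by decide : ¬ ("referer" : String) = "origin")]; exact hR
      · cases o with
        | none =>
          cases r with
          | none => simp [pvShape, PySem.Dict.insert]
          | some w =>
            have : rf = true := hV2 rfl (by simp)
            subst this
            simp [pvShape, PySem.Dict.insert]
        | some v =>
          cases r with
          | none => simp [pvShape, PySem.Dict.insert]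
          | some w =>
            cases rf with
            | true => simp [pvShape, PySem.Dict.insert]
            | false => simp [pvShape, PySem.Dict.insert]
    · by_cases hRn : PySem.Str.lower (PySem.Str.strip kv.1) = "referer"
      · rw [pvG_referer _ _ hv hRn, pvNormStep_keep _ _ hv, pvStepA_referer _ _ hv hRn, hRn]
        refine ⟨⟨fun _ => by simp, fun ho _ => ?_⟩, ?_, ?_, ?_⟩
        · -- new rf is true when o = none
          cases o with
          | none =>
            cases r with
            | none => simp
            | some w => have hrf : rf = true := hV2 rfl (by simp); simp [hrf]
          | some v => exact absurd ho (Option.some_ne_none _)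
        · rw [PySem.Dict.get?_insert, if_neg (by decide : ¬ ("origin" : String) = "referer")]; exact hO
        · simp
        · cases o with
          | none =>
            cases r with
            | none => simp [pvShape, PySem.Dict.insert]
            | some w =>
              have : rf = true := hV2 rfl (by simp)
              subst this
              simp [pvShape, PySem.Dict.insert]
          | some v =>
            cases r with
            | none =>
              have hrf : rf = false := by
                cases rf with
                | false => rfl
                | true => exact absurd (hV1 rfl) (by simp)
              subst hrf
              simp [pvShape, PySem.Dict.insert]
            | some w =>
              cases rf with
              | true => simp [pvShape, PySem.Dict.insert]
              | false => simp [pvShape, PySem.Dict.insert]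
      · rw [pvG_other _ _ hv hOn hRn, pvNormStep_keep _ _ hv, pvStepA_other _ _ hv hOn hRn]
        refine ⟨⟨hV1, hV2⟩, ?_, ?_, rfl⟩
        · rw [PySem.Dict.get?_insert, if_neg (fun h => hOn h.symm)]; exact hO
        · rw [PySem.Dict.get?_insert, if_neg (fun h => hRn h.symm)]; exact hR

theorem pvFold_lemma (hs : List (String × String)) :
    ∀ (st : Option String × Option String × Bool) (norm : PySem.Dict String String),
    pvValid st → norm.get? "origin" = st.1 → norm.get? "referer" = st.2.1 →
    pvValid (hs.foldl pvG st) ∧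
    (hs.foldl pvNormStep norm).get? "origin" = (hs.foldl pvG st).1 ∧
    (hs.foldl pvNormStep norm).get? "referer" = (hs.foldl pvG st).2.1 ∧
    hs.foldl pvStepA (pvShape st.1 st.2.1 st.2.2)
      = pvShape (hs.foldl pvG st).1 (hs.foldl pvG st).2.1 (hs.foldl pvG st).2.2 := by
  induction hs with
  | nil => intro st norm hV hO hR; exact ⟨hV, hO, hR, rfl⟩
  | cons kv xs ih =>
    intro st norm hV hO hR
    obtain ⟨hV', hO', hR', hS'⟩ := pvStep_lemma kv st norm hV hO hR
    obtain ⟨a, b, c, d⟩ := ih (pvG st kv) (pvNormStep norm kv) hV' hO' hR'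
    refine ⟨a, b, c, ?_⟩
    rw [List.foldl_cons, hS']
    exact d

-- B's second pass, given the two lookups
theorem pvPick_lemma (norm : PySem.Dict String String) (o r : Option String)
    (hO : norm.get? "origin" = o) (hR : norm.get? "referer" = r) :
    (pvKeep.items.foldl (pvPickStep norm) PySem.Dict.empty).items = (pvShape o r false).items := by
  have hk : pvKeep.items = [("origin", "Origin"), ("referer", "Referer")] := by decide
  rw [hk]
  simp only [List.foldl_cons, List.foldl_nil, pvPickStep, hO, hR]
  cases o with
  | none =>
    cases r with
    | none => rfl
    | some w => simp [pvShape, PySem.Dict.insert, PySem.Dict.empty]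
  | some v =>
    cases r with
    | none => simp [pvShape, PySem.Dict.insert, PySem.Dict.empty]
    | some w => simp [pvShape, PySem.Dict.insert, PySem.Dict.empty]

theorem pvIsO_not_isR (kv : String × String) (h : pvIsO kv = true) : pvIsR kv = false := by
  simp only [pvIsO, Bool.and_eq_true, beq_iff_eq] at h
  simp only [pvIsR, Bool.and_eq_false_iff]
  right
  simp [h.2]

theorem pvIsR_not_isO (kv : String × String) (h : pvIsR kv = true) : pvIsO kv = false := by
  simp only [pvIsR, Bool.and_eq_true, beq_iff_eq] at h
  simp only [pvIsO, Bool.and_eq_false_iff]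
  right
  simp [h.2]

theorem pvG_eq_of_isO (kv : String × String) (st : Option String × Option String × Bool)
    (h : pvIsO kv = true) : pvG st kv = (some (PySem.Str.strip kv.2), st.2.1, st.2.2) := by
  simp only [pvIsO, Bool.and_eq_true, beq_iff_eq, Bool.not_eq_true', beq_eq_false_iff_ne, ne_eq] at h
  exact pvG_origin st kv h.1 h.2

theorem pvG_eq_of_isR (kv : String × String) (st : Option String × Option String × Bool)
    (h : pvIsR kv = true) :
    pvG st kv = (st.1, some (PySem.Str.strip kv.2), st.2.2 || (st.1.isNone && st.2.1.isNone)) := by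
  simp only [pvIsR, Bool.and_eq_true, beq_iff_eq, Bool.not_eq_true', beq_eq_false_iff_ne, ne_eq] at h
  exact pvG_referer st kv h.1 h.2

theorem pvG_eq_of_neutral (kv : String × String) (st : Option String × Option String × Bool)
    (h1 : pvIsO kv = false) (h2 : pvIsR kv = false) : pvG st kv = st := by
  by_cases hv : kv.2 = ""
  · exact pvG_empty st kv hv
  · simp only [pvIsO, pvIsR, Bool.and_eq_false_iff, Bool.not_eq_false', beq_iff_eq, beq_eq_false_iff_ne, ne_eq] at h1 h2
    rcases h1 with h1 | h1
    · exact absurd h1 hv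
    · rcases h2 with h2 | h2
      · exact absurd h2 hv
      · exact pvG_other st kv hv h1 h2

-- after an origin entry was kept (rf false), rf stays false and origin stays kept
theorem pvAuxO (xs : List (String × String)) :
    ∀ (v : String) (r : Option String),
    ((xs.foldl pvG (some v, r, false)).1.isSome = true) ∧
    ((xs.foldl pvG (some v, r, false)).2.2 = false) ∧
    ((xs.foldl pvG (some v, r, false)).2.1.isSome = (r.isSome || xs.any pvIsR)) := by
  induction xs with
  | nil => intro v r; simp
  | cons kv xs ih =>
    intro v r
    by_cases hO : pvIsO kv = true
    · rw [List.foldl_cons, pvG_eq_of_isO kv _ hO]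
      have := ih (PySem.Str.strip kv.2) r
      simpa [pvIsO_not_isR kv hO] using this
    · by_cases hR : pvIsR kv = true
      · have e : pvG (some v, r, false) kv = (some v, some (PySem.Str.strip kv.2), false) := by
          simp [pvG_eq_of_isR kv _ hR]
        rw [List.foldl_cons, e]
        have := ih v (some (PySem.Str.strip kv.2))
        simpa [hR] using this
      · rw [List.foldl_cons,
          pvG_eq_of_neutral kv _ (by simpa using hO) (by simpa using hR)]
        have := ih v r
        simpa [(by simpa using hR : pvIsR kv = false)] using this

-- after a referer entry was kept first (rf true), rf stays true and referer stays kept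
theorem pvAuxR (xs : List (String × String)) :
    ∀ (o : Option String) (w : String),
    ((xs.foldl pvG (o, some w, true)).2.1.isSome = true) ∧
    ((xs.foldl pvG (o, some w, true)).2.2 = true) ∧
    ((xs.foldl pvG (o, some w, true)).1.isSome = (o.isSome || xs.any pvIsO)) := by
  induction xs with
  | nil => intro o w; simp
  | cons kv xs ih =>
    intro o w
    by_cases hO : pvIsO kv = true
    · rw [List.foldl_cons, pvG_eq_of_isO kv _ hO]
      have := ih (some (PySem.Str.strip kv.2)) w
      simpa [hO] using this
    · by_cases hR : pvIsR kv = true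
      · have e : pvG (o, some w, true) kv = (o, some (PySem.Str.strip kv.2), true) := by
          simp [pvG_eq_of_isR kv _ hR]
        rw [List.foldl_cons, e]
        have := ih o (PySem.Str.strip kv.2)
        simpa [pvIsR_not_isO kv hR] using this
      · rw [List.foldl_cons,
          pvG_eq_of_neutral kv _ (by simpa using hO) (by simpa using hR)]
        have := ih o w
        simpa [(by simpa using hO : pvIsO kv = false)] using this

theorem pvChar (hs : List (String × String)) :
    ((hs.foldl pvG (none, none, false)).1.isSome = hs.any pvIsO) ∧
    ((hs.foldl pvG (none, none, false)).2.1.isSome = hs.any pvIsR) ∧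
    ((hs.foldl pvG (none, none, false)).2.2 = true ↔
      hs.any pvIsR = true ∧ hs.findIdx pvIsR < hs.findIdx pvIsO) := by
  induction hs with
  | nil => simp
  | cons kv xs ih =>
    by_cases hO : pvIsO kv = true
    · have e : pvG (none, none, false) kv = (some (PySem.Str.strip kv.2), none, false) := by
        simp [pvG_eq_of_isO kv _ hO]
      rw [List.foldl_cons, e]
      have hR : pvIsR kv = false := pvIsO_not_isR kv hO
      obtain ⟨a1, a2, a3⟩ := pvAuxO xs (PySem.Str.strip kv.2) none
      refine ⟨by simpa [hO] using a1, by simpa [hR] using a3, ?_⟩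
      rw [a2]
      simp [List.findIdx_cons, hO, hR]
    · by_cases hR : pvIsR kv = true
      · have e : pvG (none, none, false) kv = (none, some (PySem.Str.strip kv.2), true) := by
          simp [pvG_eq_of_isR kv _ hR]
        rw [List.foldl_cons, e]
        have hO' : pvIsO kv = false := pvIsR_not_isO kv hR
        obtain ⟨a1, a2, a3⟩ := pvAuxR xs none (PySem.Str.strip kv.2)
        refine ⟨by simpa [hO'] using a3, by simpa [hR] using a1, ?_⟩
        rw [a2]
        simp [List.findIdx_cons, hO', hR]
      · have hO' : pvIsO kv = false := by simpa using hO
        have hR' : pvIsR kv = false := by simpa using hR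
        rw [List.foldl_cons, pvG_eq_of_neutral kv _ hO' hR']
        obtain ⟨a1, a2, a3⟩ := ih
        refine ⟨by simpa [hO'] using a1, by simpa [hR'] using a2, ?_⟩
        rw [a3]
        simp only [List.any_cons, hO', hR', Bool.false_or, List.findIdx_cons, cond_false]
        constructor <;> rintro ⟨h1, h2⟩ <;> exact ⟨h1, by omega⟩

-- shape ignores rf when origin is absent
theorem pvShape_rf_of_none (r : Option String) (rf : Bool) :
    pvShape none r rf = pvShape none r false := by
  cases r <;> rfl

-- ===== VERDICT (by name: the statement is the Claim_ definition above) =====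
theorem sanitize_captured_headers_spec : Claim_equal_sanitize_captured_headers := by
  intro headers _ hpre
  show sanitize_captured_headers headers = sanitize_captured_headers_alt headers
  cases headers with
  | none => rfl
  | some hs =>
    have hpre' : ¬ (hs.any pvIsO = true ∧ hs.any pvIsR = true ∧
        hs.findIdx pvIsR < hs.findIdx pvIsO) := hpre
    by_cases hnil : hs = []
    · subst hnil; rfl
    · have hV0 : pvValid (none, none, false) := ⟨by simp, by simp⟩
      obtain ⟨_, hO, hR, hS⟩ :=
        pvFold_lemma hs (none, none, false) PySem.Dict.empty hV0 (by decide) (by decide)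
      obtain ⟨c1, c2, c3⟩ := pvChar hs
      have hrf : (hs.foldl pvG (none, none, false)).1 = none ∨
          (hs.foldl pvG (none, none, false)).2.2 = false := by
        by_cases h : (hs.foldl pvG (none, none, false)).2.2 = true
        · left
          obtain ⟨hany, hlt⟩ := c3.mp h
          cases hgo : (hs.foldl pvG (none, none, false)).1 with
          | none => rfl
          | some v =>
            exfalso
            exact hpre' ⟨by rw [← c1, hgo]; rfl, hany, hlt⟩
        · right; simpa using h
      simp only [sanitize_captured_headers, sanitize_captured_headers_alt, if_neg hnil]
      have hS' : hs.foldl pvStepA PySem.Dict.empty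
          = pvShape (hs.foldl pvG (none, none, false)).1 (hs.foldl pvG (none, none, false)).2.1
            (hs.foldl pvG (none, none, false)).2.2 := hS
      rw [hS', pvPick_lemma _ _ _ hO hR]
      rcases hrf with h | h
      · rw [h, pvShape_rf_of_none, pvShape_rf_of_none]
      · rw [h]
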